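-- pv_equiv track=rewrite | github.com/mohAhmadRaza/UC-Barkeley-Solutions | Oreo Problem/MainCode.py | solve
-- ===== SOURCE A (Python) =====
-- def solve(S: str) -> str:
--     result = []
--
--     for i in range(1, len(S)+1):
--         if S[i-1:i+1] == "RE":
--            result.append("[###OREO###]")
--
--         elif S[i-1] == 'O':
--             result.append(" [--------] ")
--
--         elif S[i-1] == '&':
--             result.append("")
--
--         else:
--             continue
--
--     return '\n'.join(result)
-- ===== SOURCE B (Python) =====
-- def solve(S: str) -> str:
--     out = []
--     i, n = 0, len(S)
--     while i < n:
--         if S.startswith('RE', i):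
--             out.append("[###OREO###]")
--             i += 2
--         elif S[i] == 'O':
--             out.append(" [--------] ")
--             i += 1
--         elif S[i] == '&':
--             out.append("")
--             i += 1
--         else:
--             i += 1
--     return '\n'.join(out)
-- ===== Notes on version B (the rewrite author's own statement) =====
-- stated objective: alternative
-- what changed: A checks every index, comparing the two-character slice S[i-1:i+1] against 'RE' at each position; B is a tokenizer with a moving cursor that consumes a matched 'RE' as one unit (advancing by 2) and otherwise advances by one character, so the slice comparison per index disappears.
import Mathlib
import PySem

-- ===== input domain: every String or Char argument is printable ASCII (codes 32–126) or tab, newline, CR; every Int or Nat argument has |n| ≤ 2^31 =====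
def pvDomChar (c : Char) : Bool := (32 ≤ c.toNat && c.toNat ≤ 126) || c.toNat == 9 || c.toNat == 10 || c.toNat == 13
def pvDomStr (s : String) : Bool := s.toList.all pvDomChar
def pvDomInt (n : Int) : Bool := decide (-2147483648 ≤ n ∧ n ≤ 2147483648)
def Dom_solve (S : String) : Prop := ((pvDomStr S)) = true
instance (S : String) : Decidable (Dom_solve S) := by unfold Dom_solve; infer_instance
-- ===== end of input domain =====

-- B replaces A's per-index slice comparison with a tokenizer that consumes 'RE' as a unit
-- (variable-advance scan); alternative decomposition, same linear cost.

-- ===== PORT A =====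
-- literal transliteration of A: for i in range(1, len(S)+1), compare the slice S[i-1:i+1]
-- with "RE", else test S[i-1] against 'O' and '&', appending to result; join with '\n'.
def solve (S : String) : String :=
  let cs := S.toList
  let result : List String :=
    (PySem.List.pyRange 1 (PySem.Str.len S + 1) 1).foldl
      (fun result i =>
        if PySem.List.slice cs (some (i - 1)) (some (i + 1)) = ['R', 'E'] then
          result ++ ["[###OREO###]"]
        else if PySem.List.pyGet? cs (i - 1) = some 'O' then
          result ++ [" [--------] "]
        else if PySem.List.pyGet? cs (i - 1) = some '&' then
          result ++ [""]
        else result) []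
  PySem.Str.join "\n" result

-- ===== PORT B =====
-- transliteration of Source B's while-loop tokenizer: the cursor advances past both
-- characters of a matched 'RE', otherwise past one character.
def solveAltLoop : List Char → List String
  | [] => []
  | [c] =>
      if c = 'O' then [" [--------] "]
      else if c = '&' then [""]
      else []
  | c :: d :: rest =>
      if c = 'R' && d = 'E' then "[###OREO###]" :: solveAltLoop rest
      else if c = 'O' then " [--------] " :: solveAltLoop (d :: rest)
      else if c = '&' then "" :: solveAltLoop (d :: rest)
      else solveAltLoop (d :: rest)

def solve_alt (S : String) : String :=
  PySem.Str.join "\n" (solveAltLoop S.toList)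

-- ===== PRECONDITION & SPEC =====
def Spec_solve (S : String) (out : String) : Prop := out = solve_alt S
instance (S : String) (out : String) : Decidable (Spec_solve S out) := by unfold Spec_solve; infer_instance

-- ===== CLAIM (what is proved, stated in full; the proofs are below) =====
def Claim_equal_solve : Prop := ∀ (S : String), Dom_solve S → Spec_solve S (solve S)

-- ===== LEMMAS AND PROOFS =====

-- what A's loop body contributes at a position whose suffix is t
def pieceOf (t : List Char) : List String :=
  if t.take 2 = ['R', 'E'] then ["[###OREO###]"]
  else if t.head? = some 'O' then [" [--------] "]
  else if t.head? = some '&' then [""]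
  else []

-- A's contributions, summed over the suffixes of cs
def suffPieces : List Char → List String
  | [] => []
  | c :: rest => pieceOf (c :: rest) ++ suffPieces rest

lemma flatMap_range_drop (cs : List Char) :
    (List.range cs.length).flatMap (fun k => pieceOf (cs.drop k)) = suffPieces cs := by
  induction cs with
  | nil => simp [suffPieces]
  | cons c rest ih =>
    rw [List.length_cons, List.range_succ_eq_map, List.flatMap_cons, List.flatMap_map]
    simpa [suffPieces] using ih

lemma pieceOf_at (cs : List Char) (k : Nat) :
    (if PySem.List.slice cs (some ((1 : Int) + k - 1)) (some ((1 : Int) + k + 1)) = ['R', 'E'] then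
        (["[###OREO###]"] : List String)
      else if PySem.List.pyGet? cs ((1 : Int) + k - 1) = some 'O' then [" [--------] "]
      else if PySem.List.pyGet? cs ((1 : Int) + k - 1) = some '&' then [""]
      else []) = pieceOf (cs.drop k) := by
  have h1 : (1 : Int) + k - 1 = (k : Int) := by ring
  have h2 : (1 : Int) + k + 1 = ((k + 2 : Nat) : Int) := by push_cast; ring
  rw [h1, h2, PySem.List.slice_toNat cs (by positivity) (by positivity)]
  simp only [pieceOf, List.head?_drop, PySem.List.pyGet?, PySem.List.pyIdx?,
    Int.toNat_natCast]
  have h3 : k + 2 - k = 2 := by omega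
  rw [h3]
  by_cases hk : k < cs.length
  · simp [hk]
  · simp [hk, List.drop_eq_nil_of_le (by omega : cs.length ≤ k)]

lemma solve_eq_suffPieces (S : String) :
    solve S = PySem.Str.join "\n" (suffPieces S.toList) := by
  simp only [solve]
  congr 1
  have hbody :
      (fun (result : List String) (i : Int) =>
        if PySem.List.slice S.toList (some (i - 1)) (some (i + 1)) = ['R', 'E'] then
          result ++ ["[###OREO###]"]
        else if PySem.List.pyGet? S.toList (i - 1) = some 'O' then
          result ++ [" [--------] "]
        else if PySem.List.pyGet? S.toList (i - 1) = some '&' then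
          result ++ [""]
        else result)
      = fun result i => result ++
          (if PySem.List.slice S.toList (some (i - 1)) (some (i + 1)) = ['R', 'E'] then
            ["[###OREO###]"]
          else if PySem.List.pyGet? S.toList (i - 1) = some 'O' then [" [--------] "]
          else if PySem.List.pyGet? S.toList (i - 1) = some '&' then [""]
          else []) := by
    funext result i; split_ifs <;> simp
  rw [hbody, PySem.List.foldl_append_eq_flatMap]
  have hr : PySem.List.pyRange 1 (PySem.Str.len S + 1) 1
      = (List.range S.toList.length).map (fun k : Nat => 1 + (k : Int)) := by
    rw [PySem.List.pyRange_one]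
    congr 1
    simp [PySem.Str.len_eq]
  rw [hr, List.flatMap_map, ← flatMap_range_drop S.toList]
  simp only [List.nil_append]
  congr 1
  funext k
  exact pieceOf_at S.toList k

lemma suffPieces_eq_altLoop (cs : List Char) : suffPieces cs = solveAltLoop cs := by
  induction cs using solveAltLoop.induct <;>
    simp_all [suffPieces, solveAltLoop, pieceOf]
  split_ifs <;> simp_all

-- ===== VERDICT (by name: the statement is the Claim_ definition above) =====
theorem solve_spec : Claim_equal_solve := by
  intro S _
  show solve S = solve_alt S
  rw [solve_eq_suffPieces, suffPieces_eq_altLoop]; rfl
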